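-- pv_equiv track=rewrite | github.com/judy2k/my-bus-skill | src/bustracker/__init__.py | to_human
-- ===== SOURCE A (Python) =====
-- def filter_bus_times(bus_times):
--     acceptable_bus_times = {
--         bus: [t for t in times if t > 2] for (bus, times) in bus_times.items()
--         }
--     return {
--         bus: times for (bus, times) in acceptable_bus_times.items() if times
--         }
--
-- def to_human(bus_times):
--     # <say-as interpret-as="spell-out">X</say-as>31
--     bus_times = filter_bus_times(bus_times)
--     buses = [(bus, times[0]) for (bus, times) in bus_times.items() if bus in ('31', 'X31', 'N31')]
--     buses.sort(key=lambda b: b[1])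
--     if buses:
--         return ''.join(
--             "The next {bus} is in {time} minutes. ".format(bus=bus, time=time) for (bus, time) in buses
--         ).strip()
--     else:
--         return 'There are no buses. You may need to get a taxi.'
-- ===== SOURCE B (Python) =====
-- def to_human(bus_times):
--     # One pass over the items: first acceptable time per tracked bus, no intermediate dicts.
--     buses = []
--     for bus, times in bus_times.items():
--         if bus in ('31', 'X31', 'N31'):
--             t = next((t for t in times if t > 2), None)
--             if t is not None:
--                 buses.append((bus, t))
--     buses.sort(key=lambda b: b[1])
--     if not buses:
--         return 'There are no buses. You may need to get a taxi.'
--     return ' '.join(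
--         'The next {} is in {} minutes.'.format(bus, t) for (bus, t) in buses
--     )
-- ===== Notes on version B (the rewrite author's own statement) =====
-- stated objective: simpler
-- what changed: Replaces filter_bus_times's two intermediate dicts (filter every time list, then drop empties, then take element 0) by a single pass over the items that takes the first time > 2 per tracked bus (stopping at the first hit), and replaces ''.join of space-suffixed sentences plus strip() by ' '.join.
import Mathlib
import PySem

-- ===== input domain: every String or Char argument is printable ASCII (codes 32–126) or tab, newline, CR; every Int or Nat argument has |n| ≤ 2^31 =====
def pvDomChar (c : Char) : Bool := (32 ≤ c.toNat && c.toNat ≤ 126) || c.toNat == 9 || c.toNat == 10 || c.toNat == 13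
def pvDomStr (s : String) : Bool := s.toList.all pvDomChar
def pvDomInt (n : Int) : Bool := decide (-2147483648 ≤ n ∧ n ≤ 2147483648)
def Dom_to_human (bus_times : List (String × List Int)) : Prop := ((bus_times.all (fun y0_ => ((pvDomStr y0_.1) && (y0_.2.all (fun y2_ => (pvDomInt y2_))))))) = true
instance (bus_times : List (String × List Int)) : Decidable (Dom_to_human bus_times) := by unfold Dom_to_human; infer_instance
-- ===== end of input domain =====

-- B replaces the two intermediate dicts of filter_bus_times by one pass taking the first
-- acceptable time per tracked bus, and joins the sentences with ' '.join instead of ''.join + strip.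

-- ===== PORT A =====
def filter_bus_times (bus_times : List (String × List Int)) : List (String × List Int) :=
  let acceptable_bus_times := bus_times.map (fun p => (p.1, p.2.filter (fun t => decide (2 < t))))
  acceptable_bus_times.filter (fun p => !p.2.isEmpty)

def to_human (bus_times : List (String × List Int)) : String :=
  let bt := filter_bus_times bus_times
  -- times[0] never raises: filter_bus_times kept only nonempty time lists
  let buses := (bt.filter (fun p => p.1 == "31" || p.1 == "X31" || p.1 == "N31")).map
      (fun p => (p.1, (PySem.List.pyGet? p.2 0).getD 0))
  let buses := PySem.List.sorted buses (fun b => b.2)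
  if buses ≠ [] then
    PySem.Str.strip (PySem.Str.join "" (buses.map (fun b =>
      "The next " ++ b.1 ++ " is in " ++ PySem.Int.toStr b.2 ++ " minutes. ")))
  else "There are no buses. You may need to get a taxi."

-- ===== PORT B =====
def to_human_alt (bus_times : List (String × List Int)) : String :=
  let buses := bus_times.filterMap (fun p =>
    if p.1 == "31" || p.1 == "X31" || p.1 == "N31" then
      (p.2.find? (fun t => decide (2 < t))).map (fun t => (p.1, t))
    else none)
  let sorted := PySem.List.sorted buses (fun b => b.2)
  if sorted = [] then "There are no buses. You may need to get a taxi."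
  else PySem.Str.join " " (sorted.map (fun b =>
    "The next " ++ b.1 ++ " is in " ++ PySem.Int.toStr b.2 ++ " minutes."))

-- ===== PRECONDITION & SPEC =====
def Spec_to_human (bus_times : List (String × List Int)) (out : String) : Prop := out = to_human_alt bus_times
instance (bus_times : List (String × List Int)) (out : String) : Decidable (Spec_to_human bus_times out) := by unfold Spec_to_human; infer_instance

-- ===== CLAIM (what is proved, stated in full; the proofs are below) =====
def Claim_equal_to_human : Prop := ∀ (bus_times : List (String × List Int)), Dom_to_human bus_times → Spec_to_human bus_times (to_human bus_times)

-- ===== LEMMAS AND PROOFS =====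

-- The two candidate lists coincide: "filter times > 2, drop empties, take times[0]"
-- equals "first time > 2 per bus, if any".
lemma buses_eq (bt : List (String × List Int)) :
    (((bt.map (fun p => (p.1, p.2.filter (fun t => decide (2 < t))))).filter
        (fun p => !p.2.isEmpty)).filter
          (fun p => p.1 == "31" || p.1 == "X31" || p.1 == "N31")).map
            (fun p => (p.1, (PySem.List.pyGet? p.2 0).getD 0))
    = bt.filterMap (fun p =>
        if p.1 == "31" || p.1 == "X31" || p.1 == "N31" then
          (p.2.find? (fun t => decide (2 < t))).map (fun t => (p.1, t))
        else none) := by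
  induction bt with
  | nil => rfl
  | cons p rest ih =>
    simp only [List.map_cons, List.filterMap_cons]
    cases hf : p.2.find? (fun t => decide (2 < t)) with
    | none =>
      have hempty : p.2.filter (fun t => decide (2 < t)) = [] :=
        List.filter_eq_nil_iff.mpr (List.find?_eq_none.mp hf)
      rw [List.filter_cons]
      simp only [hempty, List.isEmpty_nil, Bool.not_true, Bool.false_eq_true, if_false,
        Option.map_none, ite_self]
      exact ih
    | some a =>
      have hne : (p.2.filter (fun t => decide (2 < t))).isEmpty = false := by
        rw [List.isEmpty_eq_false_iff, ← List.head?_filter] at *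
        intro h
        rw [h] at hf; simp at hf
      have hhead : (p.2.filter (fun t => decide (2 < t))).head? = some a := by
        rw [List.head?_filter]; exact hf
      have hget : (PySem.List.pyGet? (p.2.filter (fun t => decide (2 < t))) 0).getD 0 = a := by
        have hn := PySem.List.pyGet?_natCast (p.2.filter (fun t => decide (2 < t))) 0
        simp only [Nat.cast_zero] at hn
        rw [hn, ← List.head?_eq_getElem?, hhead, Option.getD_some]
      rw [List.filter_cons]
      simp only [hne, Bool.not_false, if_true]
      rw [List.filter_cons]
      by_cases hc : (p.1 == "31" || p.1 == "X31" || p.1 == "N31") = true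
      · simp only [hc, if_true, List.map_cons, hget, Option.map_some, ih]
      · simp only [Bool.not_eq_true] at hc
        simp only [hc, Bool.false_eq_true, if_false, Option.map_some]
        exact ih

lemma intercalate_head (l : List (List Char)) (s : List Char)
    (hs : ∀ x ∈ l, ∃ t, x = 'T' :: t) (hmem : s ∈ l.head?) :
    ∃ t, List.intercalate [' '] l = 'T' :: t := by
  cases l with
  | nil => simp at hmem
  | cons a rest =>
    obtain ⟨t, ht⟩ := hs a List.mem_cons_self
    cases rest with
    | nil => exact ⟨t, by simp [List.intercalate, List.intersperse, ht]⟩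
    | cons b r =>
      refine ⟨t ++ (' ' :: List.intercalate [' '] (b :: r)), ?_⟩
      simp [List.intercalate, List.intersperse, ht]

lemma intercalate_last (l : List (List Char)) (h : l ≠ [])
    (hs : ∀ x ∈ l, (x.getLast? = some '.')) :
    (List.intercalate [' '] l).getLast? = some '.' := by
  induction l with
  | nil => simp at h
  | cons a rest ih =>
    cases rest with
    | nil =>
      simpa [List.intercalate, List.intersperse] using hs a List.mem_cons_self
    | cons b r =>
      have hx : List.intercalate [' '] (a :: b :: r) = a ++ (' ' :: List.intercalate [' '] (b :: r)) := by
        simp [List.intercalate, List.intersperse]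
      have hrest := ih (by simp) (fun x hx => hs x (List.mem_cons_of_mem _ hx))
      rw [hx, List.getLast?_append]
      have : (' ' :: List.intercalate [' '] (b :: r)).getLast? = some '.' := by
        rw [show (' ' :: List.intercalate [' '] (b :: r)) = [' '] ++ List.intercalate [' '] (b :: r) from rfl,
          List.getLast?_append, hrest]
        rfl
      rw [this]; rfl

lemma flatten_map_space (l : List (List Char)) (h : l ≠ []) :
    (l.map (· ++ [' '])).flatten = List.intercalate [' '] l ++ [' '] := by
  induction l with
  | nil => simp at h
  | cons a rest ih =>
    cases rest with
    | nil => simp [List.intercalate, List.intersperse]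
    | cons b r =>
      have hx : List.intercalate [' '] (a :: b :: r) = a ++ (' ' :: List.intercalate [' '] (b :: r)) := by
        simp [List.intercalate, List.intersperse]
      rw [List.map_cons, List.flatten_cons, ih (by simp), hx]
      simp

lemma strip_sandwich (Y : List Char) (t : List Char) (hh : Y = 'T' :: t)
    (hl : Y.getLast? = some '.') :
    PySem.Chars.strip (Y ++ [' ']) = Y := by
  unfold PySem.Chars.strip PySem.Chars.lstrip PySem.Chars.rstrip
  have h1 : List.dropWhile PySem.Chars.isspace (Y ++ [' ']) = Y ++ [' '] := by
    rw [hh]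
    simp only [List.cons_append, List.dropWhile_cons]
    have : PySem.Chars.isspace 'T' = false := by decide
    simp [this]
  rw [h1]
  have h2 : (Y ++ [' ']).reverse = ' ' :: Y.reverse := by simp
  rw [h2, List.dropWhile_cons]
  have hsp : PySem.Chars.isspace ' ' = true := by decide
  simp only [hsp, if_true]
  rw [← List.head?_reverse] at hl
  obtain ⟨cs, hcs⟩ := List.head?_eq_some_iff.mp hl
  rw [hcs, List.dropWhile_cons]
  have hdp : PySem.Chars.isspace '.' = false := by decide
  simp only [hdp, Bool.false_eq_true, if_false]
  rw [← hcs, List.reverse_reverse]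

-- each rendered sentence starts with 'T' and ends with '.'
lemma sentence_shape (b : String × Int) :
    (∃ t, ("The next " ++ b.1 ++ " is in " ++ PySem.Int.toStr b.2 ++ " minutes.").toList = 'T' :: t)
    ∧ ("The next " ++ b.1 ++ " is in " ++ PySem.Int.toStr b.2 ++ " minutes.").toList.getLast? = some '.' := by
  constructor
  · refine ⟨"he next ".toList ++ b.1.toList ++ " is in ".toList ++ (PySem.Int.toStr b.2).toList ++ " minutes.".toList, ?_⟩
    simp [String.toList_append]
  · simp only [String.toList_append, List.append_assoc, List.getLast?_append]
    have : (" minutes." : String).toList.getLast? = some '.' := by decide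
    rw [this]
    rfl

lemma join_strip (L : List (String × Int)) (h : L ≠ []) :
    PySem.Str.strip (PySem.Str.join "" (L.map (fun b =>
        "The next " ++ b.1 ++ " is in " ++ PySem.Int.toStr b.2 ++ " minutes. ")))
    = PySem.Str.join " " (L.map (fun b =>
        "The next " ++ b.1 ++ " is in " ++ PySem.Int.toStr b.2 ++ " minutes.")) := by
  rw [← String.toList_inj]
  rw [PySem.Str.toList_strip, PySem.Str.toList_join, PySem.Str.toList_join]
  unfold PySem.Chars.join
  set sent : (String × Int) → List Char :=
    fun b => ("The next " ++ b.1 ++ " is in " ++ PySem.Int.toStr b.2 ++ " minutes.").toList with hsent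
  have hmapA : (L.map (fun b => "The next " ++ b.1 ++ " is in " ++ PySem.Int.toStr b.2 ++ " minutes. ")).map String.toList
      = (L.map sent).map (· ++ [' ']) := by
    simp only [List.map_map, hsent]
    apply List.map_congr_left
    intro b _
    show ("The next " ++ b.1 ++ " is in " ++ PySem.Int.toStr b.2 ++ " minutes. ").toList = _
    simp only [Function.comp, String.toList_append]
    have : (" minutes. " : String).toList = (" minutes." : String).toList ++ [' '] := by decide
    rw [this]
    simp
  have hmapB : (L.map (fun b => "The next " ++ b.1 ++ " is in " ++ PySem.Int.toStr b.2 ++ " minutes.")).map String.toList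
      = L.map sent := by simp [List.map_map, hsent]
  rw [hmapA, hmapB]
  have hne : L.map sent ≠ [] := by simp [h]
  have hflat : List.intercalate ("" : String).toList ((L.map sent).map (· ++ [' ']))
      = ((L.map sent).map (· ++ [' '])).flatten := by
    show List.intercalate [] _ = _
    induction ((L.map sent).map (· ++ [' '])) with
    | nil => rfl
    | cons a r ih' =>
      cases r with
      | nil => simp [List.intercalate, List.intersperse]
      | cons c cs =>
        have : List.intercalate ([] : List Char) (a :: c :: cs) = a ++ ([] ++ List.intercalate [] (c :: cs)) := by
          simp [List.intercalate, List.intersperse]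
        rw [this, ih']
        simp
  rw [hflat, flatten_map_space _ hne]
  have hT : ∀ x ∈ L.map sent, ∃ t, x = 'T' :: t := by
    intro x hx
    obtain ⟨b, _, rfl⟩ := List.mem_map.mp hx
    exact (sentence_shape b).1
  have hD : ∀ x ∈ L.map sent, x.getLast? = some '.' := by
    intro x hx
    obtain ⟨b, _, rfl⟩ := List.mem_map.mp hx
    exact (sentence_shape b).2
  obtain ⟨s, hs⟩ : ∃ s, (L.map sent).head? = some s := by
    cases hL : L.map sent with
    | nil => exact absurd hL hne
    | cons a r => exact ⟨a, rfl⟩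
  obtain ⟨t, ht⟩ := intercalate_head (L.map sent) s hT (by rw [hs]; rfl)
  have hlast := intercalate_last (L.map sent) hne hD
  have := strip_sandwich (List.intercalate [' '] (L.map sent)) t ht hlast
  rw [this]
  show _ = List.intercalate (" " : String).toList (L.map sent)
  rfl

-- ===== VERDICT (by name: the statement is the Claim_ definition above) =====
theorem to_human_spec : Claim_equal_to_human := by
  intro bus_times _
  unfold Spec_to_human to_human to_human_alt filter_bus_times
  simp only []
  rw [buses_eq bus_times]
  set buses := bus_times.filterMap (fun p =>
    if p.1 == "31" || p.1 == "X31" || p.1 == "N31" then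
      (p.2.find? (fun t => decide (2 < t))).map (fun t => (p.1, t))
    else none) with hb
  set L := PySem.List.sorted buses (fun b => b.2) with hL
  by_cases hc : L = []
  · simp [hc]
  · simp only [hc, if_false, ne_eq, not_false_iff, if_true]
    rw [join_strip L hc]
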